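-- pv_equiv track=rewrite | github.com/chanchs/euler | problems/problem-59.py | compute
-- ===== SOURCE A (Python) =====
-- def compute(CIPHERTEXT):
--     bestkey = max(((x, y, z)
--                    for x in range(97, 123)  # ASCII lowercase 'a' to 'z'
--                    for y in range(97, 123)
--                    for z in range(97, 123)),
--                   key=lambda key: get_score(decrypt(CIPHERTEXT, key)))
--
--     ans = sum(decrypt(CIPHERTEXT, bestkey))
--     return str(ans)
--
-- def get_score(plaintext):
--     result = 0
--     for c in plaintext:
--         if 65 <= c <= 90:  # ASCII uppercase 'A' to 'Z', good
--             result += 1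
--         elif 97 <= c <= 122:  # ASCII lowercase 'a' to 'z', excellent
--             result += 2
--         elif c < 0x20 or c == 0x7F:  # ASCII control characters, very bad
--             result -= 10
--     return result
--
-- def decrypt(ciphertext, key):
--     return [(c ^ key[i % len(key)]) for (i, c) in enumerate(ciphertext)]
-- ===== SOURCE B (Python) =====
-- def compute(CIPHERTEXT):
--     def sb(c):
--         if 65 <= c <= 90:
--             return 1
--         if 97 <= c <= 122:
--             return 2
--         if c < 0x20 or c == 0x7F:
--             return -10
--         return 0
--
--     # split the ciphertext into the three key-residue streams in one pass
--     chunks = ([], [], [])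
--     for i, c in enumerate(CIPHERTEXT):
--         chunks[i % 3].append(c)
--
--     # each key byte is scored independently on its own stream (first/smallest max wins)
--     key = [max(range(97, 123), key=lambda b: sum(sb(c ^ b) for c in ch)) for ch in chunks]
--
--     ans = sum(c ^ k for ch, k in zip(chunks, key) for c in ch)
--     return str(ans)
-- ===== Notes on version B (the rewrite author's own statement) =====
-- stated objective: faster
-- what changed: Instead of scoring all 26^3 candidate keys against the whole ciphertext, B splits the ciphertext into the three key-residue streams once and picks each key byte independently as the first max-scoring byte of its own stream (the score of a key is the sum of the three per-stream scores, so the lexicographically first argmax triple is the triple of componentwise first argmaxes).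
import Mathlib
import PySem

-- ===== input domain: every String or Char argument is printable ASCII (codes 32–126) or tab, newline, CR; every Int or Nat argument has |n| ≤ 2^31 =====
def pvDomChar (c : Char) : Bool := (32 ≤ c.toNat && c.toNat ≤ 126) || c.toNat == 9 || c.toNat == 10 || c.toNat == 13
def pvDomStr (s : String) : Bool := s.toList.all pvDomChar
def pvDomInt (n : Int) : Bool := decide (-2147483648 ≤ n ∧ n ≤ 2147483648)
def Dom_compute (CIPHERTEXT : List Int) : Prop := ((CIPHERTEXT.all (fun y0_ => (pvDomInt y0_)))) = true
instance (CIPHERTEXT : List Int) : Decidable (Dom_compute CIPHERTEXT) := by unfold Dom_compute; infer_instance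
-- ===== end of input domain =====

-- B scores each of the three key-residue streams once and picks each key byte independently
-- (first max-scoring byte), instead of scoring all 26^3 keys against the whole ciphertext.

-- ===== PORT A =====
-- get_score: the scoring loop over the decrypted bytes
def pvGetScore (pt : List Int) : Int :=
  pt.foldl (fun result c =>
    if 65 ≤ c ∧ c ≤ 90 then result + 1
    else if 97 ≤ c ∧ c ≤ 122 then result + 2
    else if c < 0x20 ∨ c = 0x7F then result - 10
    else result) 0

-- decrypt: [(c ^ key[i % len(key)]) for (i, c) in enumerate(ciphertext)]  (key a 3-tuple)
def pvDecrypt (ciphertext : List Int) (key : Int × Int × Int) : List Int :=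
  (PySem.List.enumerate ciphertext 0).map
    (fun p => PySem.Int.bxor p.2 (PySem.List.pyGetD [key.1, key.2.1, key.2.2] (PySem.Int.mod p.1 3) 0))

-- the generator of all (x, y, z) triples, x/y/z in range(97, 123), in generation (lex) order
def pvKeysA : List (Int × Int × Int) :=
  (PySem.List.pyRange 97 123 1).flatMap (fun x =>
    (PySem.List.pyRange 97 123 1).flatMap (fun y =>
      (PySem.List.pyRange 97 123 1).map (fun z => (x, y, z))))

def compute (CIPHERTEXT : List Int) : String :=
  -- max(...) over the key generator; the generator is a nonempty literal, so Python's max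
  -- always returns and the default of getD is unreachable
  let bestkey := (PySem.List.max? pvKeysA
    (fun key => pvGetScore (pvDecrypt CIPHERTEXT key))).getD (97, 97, 97)
  PySem.Int.toStr (pvDecrypt CIPHERTEXT bestkey).sum

-- ===== PORT B =====
-- sb(c): the per-byte score
def pvScoreByte (c : Int) : Int :=
  if 65 ≤ c ∧ c ≤ 90 then 1
  else if 97 ≤ c ∧ c ≤ 122 then 2
  else if c < 0x20 ∨ c = 0x7F then -10
  else 0

-- the chunk-splitting loop: chunks[i % 3].append(c)
def pvChunks (ct : List Int) : List Int × List Int × List Int :=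
  (PySem.List.enumerate ct 0).foldl (fun s p =>
    if PySem.Int.mod p.1 3 = 0 then (s.1 ++ [p.2], s.2.1, s.2.2)
    else if PySem.Int.mod p.1 3 = 1 then (s.1, s.2.1 ++ [p.2], s.2.2)
    else (s.1, s.2.1, s.2.2 ++ [p.2])) ([], [], [])

-- sum(sb(c ^ b) for c in ch)
def pvChunkScore (ch : List Int) (b : Int) : Int :=
  (ch.map (fun c => pvScoreByte (PySem.Int.bxor c b))).sum

-- max(range(97, 123), key=...): first max-scoring byte (range nonempty, so max never fails)
def pvBestByte (ch : List Int) : Int :=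
  (PySem.List.max? (PySem.List.pyRange 97 123 1) (pvChunkScore ch)).getD 0

def compute_alt (CIPHERTEXT : List Int) : String :=
  let c := pvChunks CIPHERTEXT
  let k0 := pvBestByte c.1
  let k1 := pvBestByte c.2.1
  let k2 := pvBestByte c.2.2
  PySem.Int.toStr
    ((c.1.map (fun x => PySem.Int.bxor x k0)).sum +
     (c.2.1.map (fun x => PySem.Int.bxor x k1)).sum +
     (c.2.2.map (fun x => PySem.Int.bxor x k2)).sum)

-- ===== PRECONDITION & SPEC =====
def Spec_compute (CIPHERTEXT : List Int) (out : String) : Prop := out = compute_alt CIPHERTEXT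
instance (CIPHERTEXT : List Int) (out : String) : Decidable (Spec_compute CIPHERTEXT out) := by unfold Spec_compute; infer_instance

-- ===== CLAIM (what is proved, stated in full; the proofs are below) =====
def Claim_equal_compute : Prop := ∀ (CIPHERTEXT : List Int), Dom_compute CIPHERTEXT → Spec_compute CIPHERTEXT (compute CIPHERTEXT)

-- ===== LEMMAS AND PROOFS =====

-- proof-side: the three residue streams, by structural recursion (rotating)
def pvSplit3 : List Int → List Int × List Int × List Int
  | [] => ([], [], [])
  | a :: t => ((a :: (pvSplit3 t).2.2), (pvSplit3 t).1, (pvSplit3 t).2.1)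

theorem pvMod3_natCast (n : Nat) : PySem.Int.mod (n : Int) 3 = ((n % 3 : Nat) : Int) := by
  rw [PySem.Int.mod_eq_emod_of_pos (by norm_num)]
  omega

-- pvChunks computes pvSplit3
theorem pvChunksAux (t : List Int) : ∀ (n : Nat) (a b c : List Int),
    (PySem.List.enumerate t (n : Int)).foldl (fun s p =>
      if PySem.Int.mod p.1 3 = 0 then (s.1 ++ [p.2], s.2.1, s.2.2)
      else if PySem.Int.mod p.1 3 = 1 then (s.1, s.2.1 ++ [p.2], s.2.2)
      else (s.1, s.2.1, s.2.2 ++ [p.2])) (a, b, c) =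
    (if n % 3 = 0 then (a ++ (pvSplit3 t).1, b ++ (pvSplit3 t).2.1, c ++ (pvSplit3 t).2.2)
     else if n % 3 = 1 then (a ++ (pvSplit3 t).2.2, b ++ (pvSplit3 t).1, c ++ (pvSplit3 t).2.1)
     else (a ++ (pvSplit3 t).2.1, b ++ (pvSplit3 t).2.2, c ++ (pvSplit3 t).1)) := by
  induction t with
  | nil =>
    intro n a b c
    simp only [PySem.List.enumerate_nil, List.foldl_nil, pvSplit3]
    split_ifs <;> simp
  | cons x t ih =>
    intro n a b c
    rw [PySem.List.enumerate_cons, List.foldl_cons]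
    have hcast : (n : Int) + 1 = ((n + 1 : Nat) : Int) := by push_cast; ring
    have h3 : n % 3 = 0 ∨ n % 3 = 1 ∨ n % 3 = 2 := by omega
    rcases h3 with h | h | h
    · have hc : PySem.Int.mod ((n : Int)) 3 = 0 := by rw [pvMod3_natCast n, h]; norm_num
      simp only [hc, hcast]
      rw [ih]
      have h1 : (n + 1) % 3 = 1 := by omega
      simp [h, h1, pvSplit3]
    · have hc : PySem.Int.mod ((n : Int)) 3 = 1 := by rw [pvMod3_natCast n, h]; norm_num
      simp only [hc, hcast]
      rw [ih]
      have h1 : (n + 1) % 3 = 2 := by omega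
      simp [h, h1, pvSplit3]
    · have hc : PySem.Int.mod ((n : Int)) 3 = 2 := by rw [pvMod3_natCast n, h]; norm_num
      simp only [hc, hcast]
      rw [ih]
      have h1 : (n + 1) % 3 = 0 := by omega
      simp [h, h1, pvSplit3]

theorem pvChunks_eq (ct : List Int) : pvChunks ct = pvSplit3 ct := by
  have := pvChunksAux ct 0 [] [] []
  simpa [pvChunks] using this

-- the central decomposition: a mod-3-keyed sum over the enumerated list splits into
-- three per-stream sums, with the key rotated according to the start index
theorem pvGetAt0 (x y z : Int) : PySem.List.pyGetD [x, y, z] 0 0 = x := by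
  simp [PySem.List.pyGetD]
theorem pvGetAt1 (x y z : Int) : PySem.List.pyGetD [x, y, z] 1 0 = y := by
  simp [PySem.List.pyGetD]
theorem pvGetAt2 (x y z : Int) : PySem.List.pyGetD [x, y, z] 2 0 = z := by
  simp [PySem.List.pyGetD]

-- the central decomposition: a mod-3-keyed sum over the enumerated list splits into
-- three per-stream sums, with the key rotated according to the start index
theorem pvSumAux (F : Int → Int → Int) (t : List Int) : ∀ (n : Nat) (x y z : Int),
    ((PySem.List.enumerate t (n : Int)).map
      (fun p => F p.2 (PySem.List.pyGetD [x, y, z] (PySem.Int.mod p.1 3) 0))).sum =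
    (if n % 3 = 0 then
      ((pvSplit3 t).1.map (fun c => F c x)).sum + ((pvSplit3 t).2.1.map (fun c => F c y)).sum +
        ((pvSplit3 t).2.2.map (fun c => F c z)).sum
     else if n % 3 = 1 then
      ((pvSplit3 t).1.map (fun c => F c y)).sum + ((pvSplit3 t).2.1.map (fun c => F c z)).sum +
        ((pvSplit3 t).2.2.map (fun c => F c x)).sum
     else
      ((pvSplit3 t).1.map (fun c => F c z)).sum + ((pvSplit3 t).2.1.map (fun c => F c x)).sum +
        ((pvSplit3 t).2.2.map (fun c => F c y)).sum) := by
  induction t with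
  | nil =>
    intro n x y z
    simp only [PySem.List.enumerate_nil, List.map_nil, List.sum_nil, pvSplit3]
    split_ifs <;> simp
  | cons a t ih =>
    intro n x y z
    rw [PySem.List.enumerate_cons, List.map_cons, List.sum_cons]
    have hcast : (n : Int) + 1 = ((n + 1 : Nat) : Int) := by push_cast; ring
    have h3 : n % 3 = 0 ∨ n % 3 = 1 ∨ n % 3 = 2 := by omega
    rcases h3 with h | h | h
    · have hc : PySem.Int.mod ((n : Int)) 3 = 0 := by rw [pvMod3_natCast n, h]; norm_num
      simp only [hc, hcast, pvGetAt0]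
      rw [ih]
      have h1 : (n + 1) % 3 = 1 := by omega
      simp [h, h1, pvSplit3]
      ring
    · have hc : PySem.Int.mod ((n : Int)) 3 = 1 := by rw [pvMod3_natCast n, h]; norm_num
      simp only [hc, hcast, pvGetAt1]
      rw [ih]
      have h1 : (n + 1) % 3 = 2 := by omega
      simp [h, h1, pvSplit3]
      ring
    · have hc : PySem.Int.mod ((n : Int)) 3 = 2 := by rw [pvMod3_natCast n, h]; norm_num
      simp only [hc, hcast, pvGetAt2]
      rw [ih]
      have h1 : (n + 1) % 3 = 0 := by omega
      simp [h, h1, pvSplit3]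
      ring

-- get_score is the sum of the per-byte scores
theorem pvGetScore_eq (pt : List Int) : pvGetScore pt = (pt.map pvScoreByte).sum := by
  have hstep : (fun (result c : Int) =>
      if 65 ≤ c ∧ c ≤ 90 then result + 1
      else if 97 ≤ c ∧ c ≤ 122 then result + 2
      else if c < 0x20 ∨ c = 0x7F then result - 10
      else result) = fun result c => result + pvScoreByte c := by
    funext r c
    simp only [pvScoreByte]
    split_ifs <;> ring
  rw [pvGetScore, hstep, PySem.List.foldl_add]
  simp

-- get_score of decrypt splits into the three per-stream chunk scores
theorem pvScore_decomp (ct : List Int) (x y z : Int) :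
    pvGetScore (pvDecrypt ct (x, y, z)) =
    pvChunkScore (pvSplit3 ct).1 x + pvChunkScore (pvSplit3 ct).2.1 y +
      pvChunkScore (pvSplit3 ct).2.2 z := by
  rw [pvGetScore_eq, pvDecrypt, List.map_map]
  have := pvSumAux (fun c k => pvScoreByte (PySem.Int.bxor c k)) ct 0 x y z
  simp only [Nat.zero_mod, Nat.cast_zero] at this
  simpa [Function.comp, pvChunkScore] using this

-- sum of decrypt splits into the three per-stream sums
theorem pvSum_decomp (ct : List Int) (x y z : Int) :
    (pvDecrypt ct (x, y, z)).sum =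
    ((pvSplit3 ct).1.map (fun c => PySem.Int.bxor c x)).sum +
      ((pvSplit3 ct).2.1.map (fun c => PySem.Int.bxor c y)).sum +
      ((pvSplit3 ct).2.2.map (fun c => PySem.Int.bxor c z)).sum := by
  rw [pvDecrypt]
  have := pvSumAux (fun c k => PySem.Int.bxor c k) ct 0 x y z
  simp only [Nat.zero_mod, Nat.cast_zero] at this
  simpa using this

-- === first-max machinery ===
def pvPick {α : Type} (key : α → Int) (m x : α) : α := if key m < key x then x else m

theorem pvFoldl_some {α : Type} (key : α → Int) (t : List α) : ∀ (m : α),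
    t.foldl (fun acc x =>
      match acc with
      | none => some x
      | some m => if key m < key x then some x else some m) (some m) =
    some (t.foldl (pvPick key) m) := by
  induction t with
  | nil => intro m; rfl
  | cons x t ih =>
    intro m
    simp only [List.foldl_cons, pvPick]
    split_ifs with h <;> simp [ih]

theorem pvMax?_cons {α : Type} (key : α → Int) (h : α) (t : List α) :
    PySem.List.max? (h :: t) key = some (t.foldl (pvPick key) h) := by
  simp only [PySem.List.max?, List.foldl_cons]
  exact pvFoldl_some key t h

-- keeping: if nothing beats m strictly, the running max stays m
theorem pvFold_keep {α : Type} (key : α → Int) (t : List α) : ∀ (m : α),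
    (∀ y ∈ t, key y ≤ key m) → t.foldl (pvPick key) m = m := by
  induction t with
  | nil => intro m _; rfl
  | cons x t ih =>
    intro m hm
    have hx : key x ≤ key m := hm x (by simp)
    simp only [List.foldl_cons, pvPick, if_neg (not_lt.mpr hx)]
    exact ih m (fun y hy => hm y (by simp [hy]))

-- reaching: a prefix of strictly smaller keys is skipped, m is picked, then kept
theorem pvFold_reach {α : Type} (key : α → Int) (l1 : List α) : ∀ (a m : α) (l2 : List α),
    key a < key m → (∀ y ∈ l1, key y < key m) → (∀ y ∈ l2, key y ≤ key m) →
    (l1 ++ m :: l2).foldl (pvPick key) a = m := by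
  induction l1 with
  | nil =>
    intro a m l2 ha _ h2
    simp only [List.nil_append, List.foldl_cons, pvPick, if_pos ha]
    exact pvFold_keep key l2 m h2
  | cons x l1 ih =>
    intro a m l2 ha h1 h2
    simp only [List.cons_append, List.foldl_cons]
    have hx : key x < key m := h1 x (by simp)
    have : key (pvPick key a x) < key m := by
      simp only [pvPick]; split_ifs <;> assumption
    exact ih _ m l2 this (fun y hy => h1 y (by simp [hy])) h2

-- sufficiency: the witnessed first maximum is what max? returns
theorem pvFirstMax {α : Type} (key : α → Int) (l1 l2 : List α) (m : α)
    (h1 : ∀ y ∈ l1, key y < key m) (h2 : ∀ y ∈ l2, key y ≤ key m) :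
    PySem.List.max? (l1 ++ m :: l2) key = some m := by
  cases l1 with
  | nil =>
    rw [List.nil_append, pvMax?_cons]
    rw [pvFold_keep key l2 m h2]
  | cons x l1 =>
    rw [List.cons_append, pvMax?_cons]
    rw [pvFold_reach key l1 x m l2 (h1 x (by simp)) (fun y hy => h1 y (by simp [hy])) h2]

-- necessity: the fold result splits the list at its first maximum
theorem pvFold_split {α : Type} (key : α → Int) (t : List α) : ∀ (a m : α),
    t.foldl (pvPick key) a = m →
    (m = a ∧ ∀ y ∈ t, key y ≤ key a) ∨
    ∃ t1 t2, t = t1 ++ m :: t2 ∧ key a < key m ∧ (∀ y ∈ t1, key y < key m) ∧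
      (∀ y ∈ t2, key y ≤ key m) := by
  induction t with
  | nil => intro a m hm; left; exact ⟨hm.symm, by simp⟩
  | cons x t ih =>
    intro a m hm
    simp only [List.foldl_cons] at hm
    rcases ih (pvPick key a x) m hm with ⟨hme, hall⟩ | ⟨t1, t2, hsplit, hlt, h1, h2⟩
    · by_cases hax : key a < key x
      · right
        have hmx : m = x := by rw [hme]; simp [pvPick, if_pos hax]
        subst hmx
        refine ⟨[], t, by simp, hax, by simp, ?_⟩
        intro y hy
        have := hall y hy
        simpa [pvPick, if_pos hax] using this
      · left
        have hpa : pvPick key a x = a := by simp [pvPick, if_neg hax]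
        rw [hpa] at hme hall
        refine ⟨hme, ?_⟩
        intro y hy
        rcases List.mem_cons.mp hy with rfl | hy
        · exact not_lt.mp hax
        · exact hall y hy
    · have hxm : key x < key m := by
        have : key (pvPick key a x) < key m := hlt
        simp only [pvPick] at this
        by_cases hax : key a < key x
        · rw [if_pos hax] at this; exact this
        · rw [if_neg hax] at this; exact lt_of_le_of_lt (not_lt.mp hax) this
      have ham : key a < key m := by
        have : key (pvPick key a x) < key m := hlt
        simp only [pvPick] at this
        by_cases hax : key a < key x
        · exact lt_trans hax hxm
        · rw [if_neg hax] at this; exact this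
      right
      exact ⟨x :: t1, t2, by rw [hsplit, List.cons_append], ham,
        fun y hy => by rcases List.mem_cons.mp hy with rfl | hy; exact hxm; exact h1 y hy, h2⟩

theorem pvMax?_decomp {α : Type} (key : α → Int) (h : α) (t : List α) (m : α)
    (hm : PySem.List.max? (h :: t) key = some m) :
    ∃ l1 l2, h :: t = l1 ++ m :: l2 ∧ (∀ y ∈ l1, key y < key m) ∧ (∀ y ∈ l2, key y ≤ key m) := by
  rw [pvMax?_cons] at hm
  have hm' := Option.some.inj hm
  rcases pvFold_split key t h m hm' with ⟨hme, hall⟩ | ⟨t1, t2, hsplit, hlt, h1, h2⟩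
  · exact ⟨[], t, by simp [hme], by simp, by rw [hme]; exact hall⟩
  · exact ⟨h :: t1, t2, by rw [hsplit, List.cons_append], fun y hy => by
      rcases List.mem_cons.mp hy with rfl | hy; exact hlt; exact h1 y hy, h2⟩

-- the first maximum of the lex product under a separable key is the componentwise triple
theorem pvProdMax (f g h : Int → Int) (Lx Ly Lz : List Int) (ax ay az : Int)
    (X1 X2 Y1 Y2 Z1 Z2 : List Int)
    (hxs : Lx = X1 ++ ax :: X2) (hx1 : ∀ u ∈ X1, f u < f ax) (hx2 : ∀ u ∈ X2, f u ≤ f ax)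
    (hys : Ly = Y1 ++ ay :: Y2) (hy1 : ∀ u ∈ Y1, g u < g ay) (hy2 : ∀ u ∈ Y2, g u ≤ g ay)
    (hzs : Lz = Z1 ++ az :: Z2) (hz1 : ∀ u ∈ Z1, h u < h az) (hz2 : ∀ u ∈ Z2, h u ≤ h az) :
    PySem.List.max?
      (Lx.flatMap (fun x => Ly.flatMap (fun y => Lz.map (fun z => (x, y, z)))))
      (fun k => f k.1 + g k.2.1 + h k.2.2) = some (ax, ay, az) := by
  have hgy : ∀ u ∈ Ly, g u ≤ g ay := by
    intro u hu; rw [hys] at hu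
    rcases List.mem_append.mp hu with hu | hu
    · exact le_of_lt (hy1 u hu)
    · rcases List.mem_cons.mp hu with rfl | hu
      · exact le_refl _
      · exact hy2 u hu
  have hhz : ∀ u ∈ Lz, h u ≤ h az := by
    intro u hu; rw [hzs] at hu
    rcases List.mem_append.mp hu with hu | hu
    · exact le_of_lt (hz1 u hu)
    · rcases List.mem_cons.mp hu with rfl | hu
      · exact le_refl _
      · exact hz2 u hu
  -- rewrite the product list as l1 ++ (ax,ay,az) :: l2
  have hlist :
      Lx.flatMap (fun x => Ly.flatMap (fun y => Lz.map (fun z => (x, y, z)))) =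
      (X1.flatMap (fun x => Ly.flatMap (fun y => Lz.map (fun z => (x, y, z)))) ++
        (Y1.flatMap (fun y => Lz.map (fun z => (ax, y, z))) ++
          (Z1.map (fun z => (ax, ay, z)) ++
            ((ax, ay, az) ::
              (Z2.map (fun z => (ax, ay, z)) ++
                (Y2.flatMap (fun y => Lz.map (fun z => (ax, y, z))) ++
                  X2.flatMap (fun x => Ly.flatMap (fun y => Lz.map (fun z => (x, y, z)))))))))) := by
    rw [hxs, hys, hzs]
    simp [List.flatMap_append, List.flatMap_cons, List.map_append, List.append_assoc]
  rw [hlist]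
  have key := fun (k : Int × Int × Int) => f k.1 + g k.2.1 + h k.2.2
  -- assemble into l1 ++ m :: l2 shape for pvFirstMax
  rw [show ∀ (A B C : List (Int × Int × Int)) (m : Int × Int × Int) (D : List (Int × Int × Int)),
      A ++ (B ++ (C ++ (m :: D))) = (A ++ B ++ C) ++ m :: D by intros; simp]
  apply pvFirstMax
  · intro y hy
    simp only [List.mem_append] at hy
    rcases hy with (hy | hy) | hy
    · rcases List.mem_flatMap.mp hy with ⟨x, hx, hy⟩
      rcases List.mem_flatMap.mp hy with ⟨u, hu, hy⟩
      rcases List.mem_map.mp hy with ⟨z, hz, rfl⟩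
      have := hx1 x hx
      have := hgy u hu
      have := hhz z hz
      simp only []
      omega
    · rcases List.mem_flatMap.mp hy with ⟨u, hu, hy⟩
      rcases List.mem_map.mp hy with ⟨z, hz, rfl⟩
      have := hy1 u hu
      have := hhz z hz
      simp only []
      omega
    · rcases List.mem_map.mp hy with ⟨z, hz, rfl⟩
      have := hz1 z hz
      simp only []
      omega
  · intro y hy
    simp only [List.mem_append] at hy
    rcases hy with hy | hy | hy
    · rcases List.mem_map.mp hy with ⟨z, hz, rfl⟩
      have := hz2 z hz
      simp only []
      omega
    · rcases List.mem_flatMap.mp hy with ⟨u, hu, hy⟩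
      rcases List.mem_map.mp hy with ⟨z, hz, rfl⟩
      have := hy2 u hu
      have := hhz z hz
      simp only []
      omega
    · rcases List.mem_flatMap.mp hy with ⟨x, hx, hy⟩
      rcases List.mem_flatMap.mp hy with ⟨u, hu, hy⟩
      rcases List.mem_map.mp hy with ⟨z, hz, rfl⟩
      have := hx2 x hx
      have := hgy u hu
      have := hhz z hz
      simp only []
      omega

-- range(97,123) written as a cons, to feed pvMax?_decomp
theorem pvRange_cons : PySem.List.pyRange 97 123 1 = 97 :: PySem.List.pyRange 98 123 1 :=
  PySem.List.pyRange_one_cons (by norm_num)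

theorem pvBestByte_spec (ch : List Int) :
    ∃ l1 l2, PySem.List.pyRange 97 123 1 = l1 ++ pvBestByte ch :: l2 ∧
      (∀ y ∈ l1, pvChunkScore ch y < pvChunkScore ch (pvBestByte ch)) ∧
      (∀ y ∈ l2, pvChunkScore ch y ≤ pvChunkScore ch (pvBestByte ch)) := by
  obtain ⟨m, hm⟩ : ∃ m, PySem.List.max? (PySem.List.pyRange 97 123 1) (pvChunkScore ch) = some m := by
    rw [pvRange_cons, pvMax?_cons]
    exact ⟨_, rfl⟩
  have hb : pvBestByte ch = m := by rw [pvBestByte, hm, Option.getD_some]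
  rw [hb]
  rw [pvRange_cons] at hm
  have := pvMax?_decomp (pvChunkScore ch) 97 (PySem.List.pyRange 98 123 1) m hm
  rwa [← pvRange_cons] at this

-- ===== VERDICT (by name: the statement is the Claim_ definition above) =====
set_option maxRecDepth 4096 in
theorem compute_spec : Claim_equal_compute := by
  intro ct _
  unfold Spec_compute
  obtain ⟨X1, X2, hxs, hx1, hx2⟩ := pvBestByte_spec (pvSplit3 ct).1
  obtain ⟨Y1, Y2, hys, hy1, hy2⟩ := pvBestByte_spec (pvSplit3 ct).2.1
  obtain ⟨Z1, Z2, hzs, hz1, hz2⟩ := pvBestByte_spec (pvSplit3 ct).2.2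
  have hkey : (fun key => pvGetScore (pvDecrypt ct key)) =
      fun k : Int × Int × Int =>
        pvChunkScore (pvSplit3 ct).1 k.1 + pvChunkScore (pvSplit3 ct).2.1 k.2.1 +
          pvChunkScore (pvSplit3 ct).2.2 k.2.2 := by
    funext k
    obtain ⟨x, y, z⟩ := k
    exact pvScore_decomp ct x y z
  have hmax : PySem.List.max? pvKeysA (fun key => pvGetScore (pvDecrypt ct key)) =
      some (pvBestByte (pvSplit3 ct).1, pvBestByte (pvSplit3 ct).2.1,
        pvBestByte (pvSplit3 ct).2.2) := by
    rw [hkey, pvKeysA]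
    exact pvProdMax _ _ _ _ _ _ _ _ _ X1 X2 Y1 Y2 Z1 Z2 hxs hx1 hx2 hys hy1 hy2 hzs hz1 hz2
  have hA : compute ct = PySem.Int.toStr (pvDecrypt ct (pvBestByte (pvSplit3 ct).1,
      pvBestByte (pvSplit3 ct).2.1, pvBestByte (pvSplit3 ct).2.2)).sum := by
    rw [compute, hmax, Option.getD_some]
  have hB : compute_alt ct =
      PySem.Int.toStr
        (((pvSplit3 ct).1.map (fun x => PySem.Int.bxor x (pvBestByte (pvSplit3 ct).1))).sum +
         ((pvSplit3 ct).2.1.map (fun x => PySem.Int.bxor x (pvBestByte (pvSplit3 ct).2.1))).sum +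
         ((pvSplit3 ct).2.2.map (fun x => PySem.Int.bxor x (pvBestByte (pvSplit3 ct).2.2))).sum) := by
    rw [compute_alt, pvChunks_eq]
  rw [hA, hB, pvSum_decomp]
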